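-- pv_equiv track=rewrite | github.com/meiiie/wiii | maritime-ai-service/app/engine/multi_agent/code_studio_response.py | _truncate_before_code_dump
-- ===== SOURCE A (Python) =====
-- _CODE_DUMP_BOUNDARY_MARKERS = (
--     "```",
--     "<style",
--     "<script",
--     "<!doctype",
--     "<html",
--     "<svg",
--     "<canvas",
--     "<section",
--     "<div",
-- )
--
-- def _truncate_before_code_dump(text: str) -> str:
--     """Keep only the user-facing prose prefix before raw code begins."""
--     raw = text or ""
--     if not raw:
--         return ""
--     lowered = raw.lower()
--     cut_points = [
--         lowered.find(marker)
--         for marker in _CODE_DUMP_BOUNDARY_MARKERS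
--         if lowered.find(marker) >= 0
--     ]
--     if not cut_points:
--         return raw
--     return raw[: min(cut_points)].rstrip()
-- ===== SOURCE B (Python) =====
-- _CODE_DUMP_BOUNDARY_MARKERS = (
--     "```",
--     "<style",
--     "<script",
--     "<!doctype",
--     "<html",
--     "<svg",
--     "<canvas",
--     "<section",
--     "<div",
-- )
--
-- def _truncate_before_code_dump(text: str) -> str:
--     """Keep only the user-facing prose prefix before raw code begins."""
--     if not text:
--         return ""
--     lowered = text.lower()
--     for i in range(len(lowered)):
--         if any(lowered.startswith(m, i) for m in _CODE_DUMP_BOUNDARY_MARKERS):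
--             return text[:i].rstrip()
--     return text
-- ===== Notes on version B (the rewrite author's own statement) =====
-- stated objective: alternative
-- what changed: Replaces nine independent str.find scans collected into a list plus min() with a single left-to-right scan that stops at the first position where any marker is a prefix (leftmost-match), returning the text unchanged when the scan finds nothing.
import Mathlib
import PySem

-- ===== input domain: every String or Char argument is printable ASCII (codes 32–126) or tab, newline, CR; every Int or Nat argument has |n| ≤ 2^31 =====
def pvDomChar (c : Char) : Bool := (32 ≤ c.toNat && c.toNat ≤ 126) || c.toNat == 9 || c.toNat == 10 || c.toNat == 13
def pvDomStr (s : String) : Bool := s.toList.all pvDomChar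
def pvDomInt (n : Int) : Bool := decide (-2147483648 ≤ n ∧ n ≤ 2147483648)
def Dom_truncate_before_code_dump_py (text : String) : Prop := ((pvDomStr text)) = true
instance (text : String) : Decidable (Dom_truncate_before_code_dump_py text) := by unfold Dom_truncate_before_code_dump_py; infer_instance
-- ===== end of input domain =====

-- B replaces nine independent find() scans plus min() with one left-to-right scan stopping at the
-- first position where any marker is a prefix (objective: alternative; same result, same cost class).

def pvMarkers : List (List Char) :=
  ["```".toList, "<style".toList, "<script".toList, "<!doctype".toList,
   "<html".toList, "<svg".toList, "<canvas".toList, "<section".toList, "<div".toList]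

-- ===== PORT A =====
def truncate_before_code_dump_py (text : String) : String :=
  let raw := text
  if raw = "" then ""
  else
    let lowered := PySem.Chars.lower raw.toList
    let cut_points := pvMarkers.filterMap (fun m =>
      let f := PySem.Chars.find lowered m
      if 0 ≤ f then some f else none)
    match PySem.List.min? cut_points (fun x => x) with
    | none => raw
    | some c =>
        String.ofList (PySem.Chars.rstrip (PySem.List.slice raw.toList none (some c)))

-- ===== PORT B =====
-- the 'for i in range(len(lowered))' loop: scans the suffix lowered[i:], i the current index
def pvScanAux (raw : List Char) : List Char → Nat → String
  | [], _ => String.ofList raw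
  | c :: rest, i =>
      if pvMarkers.any (fun m => m.isPrefixOf (c :: rest)) then
        String.ofList (PySem.Chars.rstrip (PySem.List.slice raw none (some (i : Int))))
      else pvScanAux raw rest (i + 1)

def truncate_before_code_dump_py_alt (text : String) : String :=
  if text = "" then ""
  else pvScanAux text.toList (PySem.Chars.lower text.toList) 0

-- ===== PRECONDITION & SPEC =====
def Spec_truncate_before_code_dump_py (text : String) (out : String) : Prop := out = truncate_before_code_dump_py_alt text
instance (text : String) (out : String) : Decidable (Spec_truncate_before_code_dump_py text out) := by unfold Spec_truncate_before_code_dump_py; infer_instance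

-- ===== CLAIM (what is proved, stated in full; the proofs are below) =====
def Claim_equal_truncate_before_code_dump_py : Prop := ∀ (text : String), Dom_truncate_before_code_dump_py text → Spec_truncate_before_code_dump_py text (truncate_before_code_dump_py text)

-- ===== LEMMAS AND PROOFS =====

/-- "some marker matches at position j of L" -/
def pvHit (L : List Char) (j : Nat) : Bool :=
  pvMarkers.any (fun m => m.isPrefixOf (L.drop j))

lemma pvMarkers_ne_nil : ∀ m ∈ pvMarkers, m ≠ [] := by decide

lemma pvHit_lt_length {L : List Char} {j : Nat} (h : pvHit L j = true) : j < L.length := by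
  rcases List.any_eq_true.mp h with ⟨m, hm, hp⟩
  by_contra hle
  have : L.drop j = [] := List.drop_eq_nil_of_le (by omega)
  rw [this] at hp
  exact pvMarkers_ne_nil m hm (List.prefix_nil.mp (List.isPrefixOf_iff_prefix.mp hp))

lemma pvScanAux_none (raw L : List Char) (i : Nat)
    (h : ∀ j, i ≤ j → pvHit L j = false) :
    pvScanAux raw (L.drop i) i = String.ofList raw := by
  by_cases hi : i < L.length
  · have hdrop : L.drop i = L[i] :: L.drop (i + 1) := List.drop_eq_getElem_cons hi
    rw [hdrop, pvScanAux]
    have hhit : pvHit L i = false := h i le_rfl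
    unfold pvHit at hhit
    rw [hdrop] at hhit
    rw [hhit]
    simp only [Bool.false_eq_true, if_false]
    exact pvScanAux_none raw L (i + 1) (fun j hj => h j (by omega))
  · rw [List.drop_eq_nil_of_le (by omega), pvScanAux]
termination_by L.length - i

lemma pvScanAux_hit (raw L : List Char) (i j : Nat) (hij : i ≤ j)
    (hj : pvHit L j = true) (hmin : ∀ t, i ≤ t → t < j → pvHit L t = false) :
    pvScanAux raw (L.drop i) i
      = String.ofList (PySem.Chars.rstrip (PySem.List.slice raw none (some (j : Int)))) := by
  have hjlen : j < L.length := pvHit_lt_length hj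
  have hi : i < L.length := by omega
  have hdrop : L.drop i = L[i] :: L.drop (i + 1) := List.drop_eq_getElem_cons hi
  rw [hdrop, pvScanAux]
  by_cases hie : i = j
  · subst hie
    unfold pvHit at hj
    rw [hdrop] at hj
    rw [hj, if_pos rfl]
  · have hhit : pvHit L i = false := hmin i le_rfl (by omega)
    unfold pvHit at hhit
    rw [hdrop] at hhit
    rw [hhit]
    simp only [Bool.false_eq_true, if_false]
    exact pvScanAux_hit raw L (i + 1) j (by omega) hj (fun t ht1 ht2 => hmin t (by omega) ht2)
termination_by j - i

lemma pvHit_iff_exists (L : List Char) (j : Nat) :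
    pvHit L j = true ↔ ∃ m ∈ pvMarkers, m <+: L.drop j := by
  unfold pvHit
  simp [List.any_eq_true, List.isPrefixOf_iff_prefix]

-- A marker occurs in L iff some position hits
lemma exists_pvHit_iff (L : List Char) :
    (∃ j, pvHit L j = true) ↔ ∃ m ∈ pvMarkers, m <:+: L := by
  constructor
  · rintro ⟨j, hj⟩
    rcases (pvHit_iff_exists L j).mp hj with ⟨m, hm, hp⟩
    exact ⟨m, hm, hp.isInfix.trans (List.drop_suffix j L).isInfix⟩
  · rintro ⟨m, hm, hinf⟩
    have : ∃ j, m <+: L.drop j := by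
      rw [PySem.Chars.exists_prefix_drop_iff_isIn, PySem.Chars.isIn_iff_infix]
      exact hinf
    rcases this with ⟨j, hj⟩
    exact ⟨j, (pvHit_iff_exists L j).mpr ⟨m, hm, hj⟩⟩

-- ===== VERDICT (by name: the statement is the Claim_ definition above) =====
theorem truncate_before_code_dump_py_spec : Claim_equal_truncate_before_code_dump_py := by
  intro text _
  unfold Spec_truncate_before_code_dump_py truncate_before_code_dump_py truncate_before_code_dump_py_alt
  by_cases hempty : text = ""
  · simp [hempty]
  · simp only [hempty, if_false]
    set raw := text.toList with hraw
    set L := PySem.Chars.lower raw with hL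
    set cut_points := pvMarkers.filterMap (fun m =>
      let f := PySem.Chars.find L m
      if 0 ≤ f then some f else none) with hcp
    by_cases hocc : ∃ j, pvHit L j = true
    · -- some marker occurs: both sides cut at the least hit position
      classical
      have j0spec := Nat.find_spec hocc
      set j0 := Nat.find hocc with hj0
      have j0min : ∀ t, t < j0 → pvHit L t = false := by
        intro t ht
        have := Nat.find_min hocc ht
        simpa using this
      -- B's side
      have hB : pvScanAux raw L 0 =
          String.ofList (PySem.Chars.rstrip (PySem.List.slice raw none (some (j0 : Int)))) := by
        have := pvScanAux_hit raw L 0 j0 (Nat.zero_le _) j0spec (fun t _ ht => j0min t ht)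
        simpa using this
      -- A's side: min? cut_points = some j0
      -- every cut point is ≥ j0
      have hlow : ∀ c ∈ cut_points, (j0 : Int) ≤ c := by
        intro c hc
        rw [hcp, List.mem_filterMap] at hc
        rcases hc with ⟨m, hm, hcm⟩
        simp only [] at hcm
        split_ifs at hcm with hf
        · cases hcm
          rcases PySem.Chars.find_spec hf with ⟨hpref, _⟩
          have : pvHit L (PySem.Chars.find L m).toNat = true :=
            (pvHit_iff_exists _ _).mpr ⟨m, hm, hpref⟩
          have := Nat.find_min' hocc this
          omega
      -- j0 is itself a cut point
      have hmem : (j0 : Int) ∈ cut_points := by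
        rcases (pvHit_iff_exists L j0).mp j0spec with ⟨m, hm, hp⟩
        have hinf : m <:+: L := hp.isInfix.trans (List.drop_suffix j0 L).isInfix
        have hf : 0 ≤ PySem.Chars.find L m := (PySem.Chars.find_nonneg_iff _ _).mpr hinf
        have heq : PySem.Chars.find L m = (j0 : Int) := by
          rcases PySem.Chars.find_spec hf with ⟨hpref, hfirst⟩
          have h1 : pvHit L (PySem.Chars.find L m).toNat = true :=
            (pvHit_iff_exists _ _).mpr ⟨m, hm, hpref⟩
          have h2 : j0 ≤ (PySem.Chars.find L m).toNat := Nat.find_min' hocc h1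
          have h3 : ¬ ((PySem.Chars.find L m).toNat < j0) := by omega
          have h4 : (PySem.Chars.find L m).toNat ≤ j0 := by
            by_contra hlt
            exact (by simpa using hfirst j0 (by omega) : ¬ m <+: L.drop j0) hp
          omega
        rw [hcp, List.mem_filterMap]
        exact ⟨m, hm, by simp [heq]⟩
      have hne : cut_points ≠ [] := fun h => by simp [h] at hmem
      obtain ⟨v, hv⟩ : ∃ v, PySem.List.min? cut_points (fun x => x) = some v := by
        cases hmv : PySem.List.min? cut_points (fun x => x) with
        | none => exact absurd ((PySem.List.min?_eq_none_iff _ _).mp hmv) hne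
        | some v => exact ⟨v, rfl⟩
      have hvmem := PySem.List.min?_mem hv
      have hvmin := PySem.List.min?_isMin hv
      have hveq : v = (j0 : Int) := le_antisymm (hvmin _ hmem) (hlow v hvmem)
      rw [hv, hveq, hB]
    · -- no marker occurs: both sides return the text unchanged
      have hocc' : ∀ j, pvHit L j = false := fun j =>
        Bool.eq_false_iff.mpr (fun h => hocc ⟨j, h⟩)
      have hB : pvScanAux raw L 0 = String.ofList raw := by
        have := pvScanAux_none raw L 0 (fun j _ => hocc' j)
        simpa using this
      have hA : cut_points = [] := by
        rw [hcp, List.filterMap_eq_nil_iff]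
        intro m hm
        have hinf : ¬ m <:+: L := by
          intro h
          rcases (exists_pvHit_iff L).mpr ⟨m, hm, h⟩ with ⟨j, hj⟩
          rw [hocc' j] at hj
          exact Bool.false_ne_true hj
        have hfind : PySem.Chars.find L m = -1 := (PySem.Chars.find_eq_neg_one_iff _ _).mpr hinf
        simp [hfind]
      rw [hA]
      simpa [PySem.List.min?, hraw] using hB.symm
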